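-- pv_equiv track=rewrite | github.com/ebookleader/BOJ | book/bigNum.py | makeLargestNumb1
-- ===== SOURCE A (Python) =====
-- def makeLargestNumb1(M, K, arr):
--     answer = 0
--     sortedArr = sorted(arr, reverse=True)  # 내림차순
--     if sortedArr[0] == sortedArr[1]:
--         answer = (sortedArr[0] * M)
--     else:
--         i, flag = 0, 0
--         while i < M:
--             if flag < K:
--                 answer += sortedArr[0]
--                 flag += 1
--             else:
--                 answer += sortedArr[1]
--                 flag = 0
--             i += 1
--     return answer
-- ===== SOURCE B (Python) =====
-- def makeLargestNumb1(M, K, arr):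
--     first, second = sorted(arr, reverse=True)[:2]
--     if first == second:
--         return first * M
--     if M <= 0:
--         return 0
--     if K <= 0:
--         return second * M
--     q, r = divmod(M, K + 1)
--     return q * (K * first + second) + r * first
-- ===== Notes on version B (the rewrite author's own statement) =====
-- stated objective: alternative
-- what changed: Replaces the step-by-step while loop over M iterations with closed-form arithmetic: M iterations split into floor(M/(K+1)) full groups of (K max + 1 second-max) plus a remainder of max-only steps.
import Mathlib
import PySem

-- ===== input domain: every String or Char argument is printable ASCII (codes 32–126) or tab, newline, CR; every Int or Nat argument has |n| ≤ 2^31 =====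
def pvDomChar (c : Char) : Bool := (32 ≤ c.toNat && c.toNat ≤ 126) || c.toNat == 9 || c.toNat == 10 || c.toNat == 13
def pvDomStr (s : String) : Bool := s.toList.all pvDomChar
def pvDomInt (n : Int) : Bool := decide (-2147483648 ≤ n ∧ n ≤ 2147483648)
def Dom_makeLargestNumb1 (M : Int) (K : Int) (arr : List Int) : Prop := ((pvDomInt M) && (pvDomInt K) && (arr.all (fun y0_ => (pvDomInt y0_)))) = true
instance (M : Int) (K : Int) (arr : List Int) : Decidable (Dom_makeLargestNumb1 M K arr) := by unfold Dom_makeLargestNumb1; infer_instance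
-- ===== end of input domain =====

-- B replaces A's per-iteration while loop by closed-form group arithmetic; return values agree on arr with ≥ 2 elements.

-- ===== PORT A =====
-- the while loop of A: state (answer, flag), one step per iteration, M iterations
def loopA (K s0 s1 : Int) : Nat → Int → Int → Int
  | 0, answer, _ => answer
  | n+1, answer, flag =>
    if flag < K then loopA K s0 s1 n (answer + s0) (flag + 1)
    else loopA K s0 s1 n (answer + s1) 0

def makeLargestNumb1 (M : Int) (K : Int) (arr : List Int) : Int :=
  let sortedArr := PySem.List.sorted arr (fun x => x) true
  match sortedArr with
  | s0 :: s1 :: _ => if s0 = s1 then s0 * M else loopA K s0 s1 M.toNat 0 0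
  | _ => 0   -- sortedArr[0] / sortedArr[1]: IndexError in Python; excluded by Pre_

-- ===== PORT B =====
def makeLargestNumb1_alt (M : Int) (K : Int) (arr : List Int) : Int :=
  let l := PySem.List.sorted arr (fun x => x) true
  match l.head?, l.tail.head? with
  | some first, some second =>
    if first = second then first * M
    else if M ≤ 0 then 0
    else if K ≤ 0 then second * M
    else
      let q := PySem.Int.floordiv M (K + 1)
      let r := PySem.Int.mod M (K + 1)
      q * (K * first + second) + r * first
  | _, _ => 0   -- unpacking 'first, second = …[:2]': ValueError in Python; excluded by Pre_

-- ===== PRECONDITION & SPEC =====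
-- Pre_: both Pythons raise (IndexError / ValueError) when arr has fewer than two elements.
def Pre_makeLargestNumb1 (M : Int) (K : Int) (arr : List Int) : Prop := 2 ≤ arr.length
instance (M : Int) (K : Int) (arr : List Int) : Decidable (Pre_makeLargestNumb1 M K arr) := by unfold Pre_makeLargestNumb1; infer_instance
def pvWitness_makeLargestNumb1 : Int × Int × List Int := (7, 2, [1, 5, 3])

def Spec_makeLargestNumb1 (M : Int) (K : Int) (arr : List Int) (out : Int) : Prop := out = makeLargestNumb1_alt M K arr
instance (M : Int) (K : Int) (arr : List Int) (out : Int) : Decidable (Spec_makeLargestNumb1 M K arr out) := by unfold Spec_makeLargestNumb1; infer_instance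

-- ===== CLAIM (what is proved, stated in full; the proofs are below) =====
def Claim_equal_makeLargestNumb1 : Prop := ∀ (M : Int) (K : Int) (arr : List Int), Dom_makeLargestNumb1 M K arr → Pre_makeLargestNumb1 M K arr → Spec_makeLargestNumb1 M K arr (makeLargestNumb1 M K arr)

-- ===== LEMMAS AND PROOFS =====

-- running sum of the first x steps of the infinite pattern (K × s0, then s1, repeating)
def Afun (K s0 s1 x : Int) : Int := x / (K + 1) * (K * s0 + s1) + x % (K + 1) * s0

lemma Afun_small (K s0 s1 f : Int) (h0 : 0 ≤ f) (h1 : f < K + 1) :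
    Afun K s0 s1 f = f * s0 := by
  unfold Afun
  rw [Int.ediv_eq_zero_of_lt h0 h1, Int.emod_eq_of_lt h0 h1]
  ring

lemma Afun_period (K s0 s1 x : Int) (hK : 0 < K) :
    Afun K s0 s1 (x + (K + 1)) = Afun K s0 s1 x + (K * s0 + s1) := by
  unfold Afun
  have h1 : (x + (K + 1)) / (K + 1) = x / (K + 1) + 1 := by
    have := Int.add_mul_ediv_right x 1 (show (K + 1) ≠ 0 by omega)
    simpa using this
  have h2 : (x + (K + 1)) % (K + 1) = x % (K + 1) := Int.add_emod_right x (K + 1)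
  rw [h1, h2]; ring

lemma loopA_nonpos (K s0 s1 : Int) (hK : K ≤ 0) :
    ∀ (n : Nat) (a : Int), loopA K s0 s1 n a 0 = a + n * s1 := by
  intro n
  induction n with
  | zero => intro a; simp [loopA]
  | succ m ih =>
      intro a
      have hnot : ¬ ((0 : Int) < K) := by omega
      simp only [loopA, hnot, if_false, ih]
      push_cast; ring

lemma loopA_closed (K s0 s1 : Int) (hK : 0 < K) :
    ∀ (n : Nat) (a f : Int), 0 ≤ f → f ≤ K →
      loopA K s0 s1 n a f = a + Afun K s0 s1 (f + n) - Afun K s0 s1 f := by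
  intro n
  induction n with
  | zero => intro a f _ _; simp [loopA]
  | succ m ih =>
      intro a f h0 h1
      by_cases hf : f < K
      · have hrec := ih (a + s0) (f + 1) (by omega) (by omega)
        simp only [loopA, hf, if_true, hrec]
        have e1 : Afun K s0 s1 (f + 1) = (f + 1) * s0 := Afun_small _ _ _ _ (by omega) (by omega)
        have e2 : Afun K s0 s1 f = f * s0 := Afun_small _ _ _ _ h0 (by omega)
        have e3 : (f + 1 + (m : Int)) = f + ((m : Int) + 1) := by ring
        rw [e1, e2, e3]
        push_cast; ring
      · have hfK : f = K := by omega
        have hrec := ih (a + s1) 0 le_rfl (by omega)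
        simp only [loopA, hf, if_false, hrec, zero_add]
        have e0 : Afun K s0 s1 0 = 0 := by
          have := Afun_small K s0 s1 0 le_rfl (by omega); simpa using this
        have eK : Afun K s0 s1 f = K * s0 := by
          rw [hfK]; exact Afun_small _ _ _ _ (by omega) (by omega)
        have ep : Afun K s0 s1 ((m : Int) + (K + 1)) = Afun K s0 s1 (m : Int) + (K * s0 + s1) :=
          Afun_period K s0 s1 (m : Int) hK
        push_cast
        have e3 : (f + ((m : Int) + 1)) = (m : Int) + (K + 1) := by omega
        rw [e0, e3, ep, eK]
        ring

-- ===== VERDICT (by name: the statement is the Claim_ definition above) =====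
theorem makeLargestNumb1_spec : Claim_equal_makeLargestNumb1 := by
  intro M K arr _ hpre
  unfold Spec_makeLargestNumb1 makeLargestNumb1 makeLargestNumb1_alt
  have hlen : 2 ≤ (PySem.List.sorted arr (fun x => x) true).length := by
    rwa [PySem.List.length_sorted]
  match hs : PySem.List.sorted arr (fun x => x) true with
  | [] => rw [hs] at hlen; simp at hlen
  | [_] => rw [hs] at hlen; simp at hlen
  | s0 :: s1 :: rest =>
    simp only [List.head?_cons, List.tail_cons]
    by_cases heq : s0 = s1
    · simp [heq]
    · simp only [heq, if_false]
      by_cases hM : M ≤ 0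
      · have : M.toNat = 0 := by omega
        simp [hM, this, loopA]
      · simp only [hM, if_false]
        by_cases hK : K ≤ 0
        · simp only [hK, if_true]
          have := loopA_nonpos K s0 s1 hK M.toNat 0
          rw [this, Int.toNat_of_nonneg (by omega)]
          ring
        · simp only [hK, if_false]
          have hKpos : 0 < K := by omega
          have h := loopA_closed K s0 s1 hKpos M.toNat 0 0 le_rfl (by omega)
          have hM' : ((M.toNat : Int)) = M := Int.toNat_of_nonneg (by omega)
          rw [h, hM']
          have e0 : Afun K s0 s1 0 = 0 := by
            have := Afun_small K s0 s1 0 le_rfl (by omega); simpa using this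
          rw [e0]
          have hd : PySem.Int.floordiv M (K + 1) = M / (K + 1) :=
            PySem.Int.floordiv_eq_ediv_of_pos (by omega)
          have hm : PySem.Int.mod M (K + 1) = M % (K + 1) :=
            PySem.Int.mod_eq_emod_of_pos (by omega)
          rw [hd, hm]
          unfold Afun
          ring
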